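-- pv_equiv track=rewrite | github.com/Tenjin25/TXPrecinctMap | Scripts/build_contests_from_tx_shapefiles.py | primary_candidate_names
-- ===== SOURCE A (Python) =====
-- from typing import Dict, Iterable, List, Optional, Set, Tuple
--
-- def primary_candidate_names(rows: List[dict]) -> Tuple[str, str]:
--     dem = ""
--     rep = ""
--     for row in rows:
--         if not dem:
--             dem = str(row.get("dem_candidate") or "").strip()
--         if not rep:
--             rep = str(row.get("rep_candidate") or "").strip()
--         if dem and rep:
--             break
--     return dem, rep
-- ===== SOURCE B (Python) =====
-- def primary_candidate_names(rows):
--     def hits(key):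
--         # all non-empty stripped values for this key, in order
--         return [s for row in rows if (s := str(row.get(key) or "").strip())]
--     dem = hits("dem_candidate")
--     rep = hits("rep_candidate")
--     return (dem[0] if dem else "", rep[0] if rep else "")
-- ===== Notes on version B (the rewrite author's own statement) =====
-- stated objective: idiomatic
-- what changed: Replaces A's fused stateful loop with joint early-exit break by two independent staged passes: for each key, eagerly collect all non-empty stripped values with a comprehension and take the head (default empty).
import Mathlib
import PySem

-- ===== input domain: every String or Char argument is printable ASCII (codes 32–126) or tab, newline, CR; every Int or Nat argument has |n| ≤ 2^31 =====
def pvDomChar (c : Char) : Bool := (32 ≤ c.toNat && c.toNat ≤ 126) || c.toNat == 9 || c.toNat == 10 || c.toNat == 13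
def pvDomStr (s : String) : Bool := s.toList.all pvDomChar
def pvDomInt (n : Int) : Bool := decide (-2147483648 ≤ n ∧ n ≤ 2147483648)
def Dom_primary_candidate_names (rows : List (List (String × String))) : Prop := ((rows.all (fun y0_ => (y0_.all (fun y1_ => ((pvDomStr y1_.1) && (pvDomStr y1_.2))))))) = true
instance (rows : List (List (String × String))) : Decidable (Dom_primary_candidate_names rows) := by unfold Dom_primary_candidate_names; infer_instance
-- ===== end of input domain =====

-- B replaces A's fused stateful loop (joint early-exit break) by two independent staged
-- passes: per key, eagerly collect all non-empty stripped values and take the head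
-- (idiomatic decomposition; same cost, no early exit).


-- ===== PORT A =====
-- str(row.get(key) or "").strip(): dict lookup (first match in the association list),
-- `or ""` turns a missing key into "", str() is the identity on strings, then .strip().
def pvA_val (row : List (String × String)) (key : String) : String :=
  PySem.Str.strip (((row.find? (fun p => p.1 == key)).map (·.2)).getD "")

-- the fused loop over rows with state (dem, rep) and the joint early-exit break
def pvA_loop : List (List (String × String)) → String → String → String × String
  | [], dem, rep => (dem, rep)
  | row :: rest, dem, rep =>
    let dem' := if dem = "" then pvA_val row "dem_candidate" else dem
    let rep' := if rep = "" then pvA_val row "rep_candidate" else rep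
    if dem' ≠ "" ∧ rep' ≠ "" then (dem', rep') else pvA_loop rest dem' rep'

def primary_candidate_names (rows : List (List (String × String))) : String × String :=
  pvA_loop rows "" ""

-- ===== PORT B =====
-- hits(key): the comprehension [s for row in rows if (s := str(row.get(key) or "").strip())]
def pvB_hits (rows : List (List (String × String))) (key : String) : List String :=
  rows.filterMap (fun row =>
    let s := PySem.Str.strip (((row.find? (fun p => p.1 == key)).map (·.2)).getD "")
    if s = "" then none else some s)

-- (dem[0] if dem else "", rep[0] if rep else "")
def primary_candidate_names_alt (rows : List (List (String × String))) : String × String :=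
  ((pvB_hits rows "dem_candidate").headD "", (pvB_hits rows "rep_candidate").headD "")

-- ===== PRECONDITION & SPEC =====
def Spec_primary_candidate_names (rows : List (List (String × String))) (out : String × String) : Prop := out = primary_candidate_names_alt rows
instance (rows : List (List (String × String))) (out : String × String) : Decidable (Spec_primary_candidate_names rows out) := by unfold Spec_primary_candidate_names; infer_instance

-- ===== CLAIM =====
def Claim_equal_primary_candidate_names : Prop := ∀ (rows : List (List (String × String))), Dom_primary_candidate_names rows → Spec_primary_candidate_names rows (primary_candidate_names rows)

-- ===== LEMMAS AND PROOFS =====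
-- loop invariant: A's fused loop with state (d, r) yields, per component, the state if it
-- is already non-empty, else the head of B's filtered list over the remaining rows
lemma pvA_loop_eq (rows : List (List (String × String))) (d r : String) :
    pvA_loop rows d r =
      ((if d = "" then (pvB_hits rows "dem_candidate").headD "" else d),
       (if r = "" then (pvB_hits rows "rep_candidate").headD "" else r)) := by
  induction rows generalizing d r with
  | nil =>
    simp only [pvA_loop, pvB_hits, List.filterMap_nil, List.headD_nil]
    by_cases hd : d = "" <;> by_cases hr : r = "" <;> simp [hd, hr]
  | cons row rest ih =>
    show (if _ ≠ "" ∧ _ ≠ "" then _ else pvA_loop rest _ _) = _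
    rw [ih]
    simp only [pvB_hits, List.filterMap_cons, pvA_val]
    by_cases hd : d = "" <;> by_cases hr : r = "" <;>
      simp only [hd, hr, if_pos] <;>
      split_ifs <;> simp_all

-- ===== VERDICT =====
theorem primary_candidate_names_spec : Claim_equal_primary_candidate_names := by
  intro rows _
  show pvA_loop rows "" "" = primary_candidate_names_alt rows
  rw [pvA_loop_eq]
  simp [primary_candidate_names_alt]
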